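-- pv_equiv track=rewrite | github.com/Somekh/pluszle | main.py | index_to_row_with_zero
-- ===== SOURCE A (Python) =====
-- def index_to_row_with_zero(indexes, row):
--
--     """
--     makes list of numbers (one row) and zeros of list of indexes and row
--     """
--     result_row = []
--     j=0
--
--     #return result_row
--     for i in range(len(row)):
--         if i in indexes:
--             result_row.append(row[i])
--         elif i == len(row)-1:
--             result_row.append(row[i])
--         else:
--             result_row.append(0)
--     return result_row
-- ===== SOURCE B (Python) =====
-- def index_to_row_with_zero(indexes, row):
--     """Scatter: pre-zeroed result; keep the last element and the in-range listed indexes."""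
--     result = [0] * len(row)
--     if row:
--         result[-1] = row[-1]
--     for idx in indexes:
--         if 0 <= idx < len(row):
--             result[idx] = row[idx]
--     return result
-- ===== Notes on version B (the rewrite author's own statement) =====
-- stated objective: faster
-- what changed: Replaces the scan over every position with an O(n)+O(m) membership test per position by a scatter: pre-zeroed result, last element set once, then one pass over the kept indexes writing in place.
import Mathlib
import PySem

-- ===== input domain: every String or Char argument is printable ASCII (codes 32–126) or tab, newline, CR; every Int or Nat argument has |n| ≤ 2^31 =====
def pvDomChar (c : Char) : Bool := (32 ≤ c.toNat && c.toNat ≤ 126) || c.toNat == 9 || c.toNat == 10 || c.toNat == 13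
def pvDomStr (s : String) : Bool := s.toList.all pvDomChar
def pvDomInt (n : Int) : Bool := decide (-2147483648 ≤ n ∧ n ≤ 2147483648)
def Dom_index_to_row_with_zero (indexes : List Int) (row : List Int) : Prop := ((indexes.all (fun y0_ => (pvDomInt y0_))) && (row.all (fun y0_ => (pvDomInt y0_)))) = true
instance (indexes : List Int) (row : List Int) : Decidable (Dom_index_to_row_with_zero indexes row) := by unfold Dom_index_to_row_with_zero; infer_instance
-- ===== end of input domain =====

-- B replaces A's per-position membership scan with a scatter into a pre-zeroed list (faster: one pass over the kept indexes).

-- ===== PORT A =====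
-- for i in range(len(row)): membership test, last-index test, else 0
def index_to_row_with_zero (indexes : List Int) (row : List Int) : List Int :=
  (PySem.List.pyRange 0 (row.length : Int) 1).foldl
    (fun result_row i =>
      if indexes.contains i then result_row ++ [PySem.List.pyGetD row i 0]
      else if i = (row.length : Int) - 1 then result_row ++ [PySem.List.pyGetD row i 0]
      else result_row ++ [0]) []

-- ===== PORT B =====
-- result = [0]*len(row); if row: result[-1] = row[-1]; then scatter the in-range indexes
def index_to_row_with_zero_alt (indexes : List Int) (row : List Int) : List Int :=
  let result0 : List Int := List.replicate row.length 0
  let result1 : List Int :=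
    if row.isEmpty then result0
    else result0.set (result0.length - 1) ((PySem.List.pyGet? row (-1)).getD 0)
  indexes.foldl
    (fun result idx =>
      if 0 ≤ idx ∧ idx < (row.length : Int) then
        result.set idx.toNat (PySem.List.pyGetD row idx 0)
      else result) result1

-- ===== PRECONDITION & SPEC =====
def Spec_index_to_row_with_zero (indexes : List Int) (row : List Int) (out : List Int) : Prop := out = index_to_row_with_zero_alt indexes row
instance (indexes : List Int) (row : List Int) (out : List Int) : Decidable (Spec_index_to_row_with_zero indexes row out) := by unfold Spec_index_to_row_with_zero; infer_instance

-- ===== CLAIM (what is proved, stated in full; the proofs are below) =====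
def Claim_equal_index_to_row_with_zero : Prop := ∀ (indexes : List Int) (row : List Int), Dom_index_to_row_with_zero indexes row → Spec_index_to_row_with_zero indexes row (index_to_row_with_zero indexes row)

-- ===== LEMMAS AND PROOFS =====

-- A's loop body always appends one element: rewrite it as a map over the range.
theorem portA_eq_map (indexes row : List Int) :
    index_to_row_with_zero indexes row =
      (PySem.List.pyRange 0 (row.length : Int) 1).map
        (fun i =>
          if indexes.contains i then PySem.List.pyGetD row i 0
          else if i = (row.length : Int) - 1 then PySem.List.pyGetD row i 0
          else 0) := by
  unfold index_to_row_with_zero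
  have h : (fun (result_row : List Int) (i : Int) =>
      if indexes.contains i then result_row ++ [PySem.List.pyGetD row i 0]
      else if i = (row.length : Int) - 1 then result_row ++ [PySem.List.pyGetD row i 0]
      else result_row ++ [0]) =
      (fun (result_row : List Int) (i : Int) => result_row ++
        [if indexes.contains i then PySem.List.pyGetD row i 0
         else if i = (row.length : Int) - 1 then PySem.List.pyGetD row i 0
         else 0]) := by
    funext acc i; split_ifs <;> rfl
  rw [h, PySem.List.foldl_append_singleton_eq_map]
  simp

-- the scatter loop preserves length
theorem scatter_length (row : List Int) (idxs : List Int) (init : List Int) :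
    (idxs.foldl (fun result idx =>
      if 0 ≤ idx ∧ idx < (row.length : Int) then
        result.set idx.toNat (PySem.List.pyGetD row idx 0)
      else result) init).length = init.length := by
  induction idxs generalizing init with
  | nil => rfl
  | cons a t ih =>
    simp only [List.foldl_cons]
    rw [ih]
    split_ifs <;> simp

-- element k of the scatter result
theorem scatter_get (row : List Int) (idxs : List Int) (init : List Int)
    (k : Nat) (hk : k < init.length) (hlen : init.length = row.length) :
    (idxs.foldl (fun result idx =>
      if 0 ≤ idx ∧ idx < (row.length : Int) then
        result.set idx.toNat (PySem.List.pyGetD row idx 0)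
      else result) init)[k]? =
    (if (k : Int) ∈ idxs then some (PySem.List.pyGetD row (k : Int) 0) else init[k]?) := by
  induction idxs generalizing init with
  | nil => simp
  | cons a t ih =>
    simp only [List.foldl_cons]
    have hlen' : (if 0 ≤ a ∧ a < (row.length : Int) then
        init.set a.toNat (PySem.List.pyGetD row a 0) else init).length = row.length := by
      split_ifs <;> simp [hlen]
    rw [ih _ (by omega) hlen']
    by_cases hm : (k : Int) ∈ t
    · simp [hm]
    · by_cases ha : a = (k : Int)
      · subst ha
        have hg : (0 : Int) ≤ (k : Int) ∧ (k : Int) < (row.length : Int) := by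
          constructor
          · exact_mod_cast Nat.zero_le k
          · exact_mod_cast (hlen ▸ hk)
        simp only [if_pos hg, hm]
        simp [Int.toNat_natCast, hk]
      · have hmem : ¬ ((k : Int) ∈ a :: t) := by
          intro h; rcases List.mem_cons.mp h with h | h
          · exact ha h.symm
          · exact hm h
        rw [if_neg hm, if_neg hmem]
        split_ifs with hg
        · rw [List.getElem?_set]
          have : a.toNat ≠ k := by
            intro h; apply ha; omega
          simp [this]
        · rfl

-- element k of B's initial list (zeros with the last row element)
theorem init_get (row : List Int) (k : Nat) (hk : k < row.length) :
    (if row.isEmpty then (List.replicate row.length (0 : Int))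
     else (List.replicate row.length (0 : Int)).set
       ((List.replicate row.length (0 : Int)).length - 1)
       ((PySem.List.pyGet? row (-1)).getD 0))[k]? =
    some (if k = row.length - 1 then PySem.List.pyGetD row (k : Int) 0 else 0) := by
  have hne : ¬ row.isEmpty := by
    cases row with
    | nil => simp at hk
    | cons a t => simp
  rw [if_neg hne]
  rw [PySem.List.pyGet?_neg_one]
  have hlast : row.getLast? = row[row.length - 1]? := List.getLast?_eq_getElem?
  by_cases hke : k = row.length - 1
  · subst hke
    rw [List.getElem?_set]
    simp only [List.length_replicate]
    have hlt : row.length - 1 < row.length := by omega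
    rw [if_pos hlt]
    rw [hlast]
    rw [List.getElem?_eq_getElem hlt]
    have : PySem.List.pyGetD row ((row.length - 1 : Nat) : Int) 0 = row[row.length - 1] := by
      rw [PySem.List.pyGetD_natCast]
      simp [List.getElem?_eq_getElem hlt]
    simp [this]
  · rw [List.getElem?_set]
    simp only [List.length_replicate]
    rw [if_neg (by omega)]
    rw [if_neg hke]
    simp [hk]

-- ===== VERDICT (by name: the statement is the Claim_ definition above) =====
theorem index_to_row_with_zero_spec : Claim_equal_index_to_row_with_zero := by
  intro indexes row _
  show index_to_row_with_zero indexes row = index_to_row_with_zero_alt indexes row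
  rw [portA_eq_map]
  unfold index_to_row_with_zero_alt
  simp only []
  apply List.ext_getElem?
  intro k
  by_cases hk : k < row.length
  · -- left side: element of the mapped range
    rw [PySem.List.getElem?_map_pyRange_zero _ _ _ hk]
    -- right side: scatter
    have hlenInit : (if row.isEmpty then (List.replicate row.length (0 : Int))
        else (List.replicate row.length (0 : Int)).set
          ((List.replicate row.length (0 : Int)).length - 1)
          ((PySem.List.pyGet? row (-1)).getD 0)).length = row.length := by
      split_ifs <;> simp
    rw [scatter_get row indexes _ k (by omega) hlenInit, init_get row k hk]
    by_cases hm : (k : Int) ∈ indexes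
    · simp [hm]
    · have hc : indexes.contains (k : Int) = false := by
        simpa using hm
      rw [if_neg hm]
      by_cases hke : k = row.length - 1
      · have h2 : (k : Int) = (row.length : Int) - 1 := by omega
        simp only [hc, Bool.false_eq_true, if_false, if_pos h2, if_pos hke]
      · have h2 : (k : Int) ≠ (row.length : Int) - 1 := by omega
        simp only [hc, Bool.false_eq_true, if_false, if_neg h2, if_neg hke]
  · -- both out of range
    have h1 : ((PySem.List.pyRange 0 (row.length : Int) 1).map
        (fun i =>
          if indexes.contains i then PySem.List.pyGetD row i 0
          else if i = (row.length : Int) - 1 then PySem.List.pyGetD row i 0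
          else 0))[k]? = (none : Option Int) := by
      apply List.getElem?_eq_none
      simp [PySem.List.length_pyRange_one]; omega
    rw [h1]
    symm
    apply List.getElem?_eq_none
    rw [scatter_length]
    split_ifs <;> simp <;> omega
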